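-- pv_equiv track=rewrite | github.com/paiml/depyler | examples/hard_circular_buffer.py | circular_buffer_ops
-- ===== SOURCE A (Python) =====
-- def circular_buffer_ops(capacity: int, ops: list[int], vals: list[int]) -> list[int]:
--     """Simulate circular buffer. ops: 1=enqueue, 2=dequeue, 3=peek.
--     Returns list of peek/dequeue results (-1 if empty)."""
--     buf: list[int] = []
--     i: int = 0
--     while i < capacity:
--         buf.append(0)
--         i = i + 1
--     head: int = 0
--     tail: int = 0
--     size: int = 0
--     results: list[int] = []
--     j: int = 0
--     while j < len(ops):
--         if ops[j] == 1:
--             if size < capacity: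
--                 buf[tail] = vals[j]
--                 tail = (tail + 1) % capacity
--                 size = size + 1
--         elif ops[j] == 2:
--             if size > 0:
--                 results.append(buf[head])
--                 head = (head + 1) % capacity
--                 size = size - 1
--             else:
--                 results.append(-1)
--         elif ops[j] == 3:
--             if size > 0:
--                 results.append(buf[head])
--             else:
--                 results.append(-1)
--         j = j + 1
--     return results
-- ===== SOURCE B (Python) =====
-- def circular_buffer_ops(capacity: int, ops: list[int], vals: list[int]) -> list[int]:
--     """Simulate circular buffer. ops: 1=enqueue, 2=dequeue, 3=peek.
--     Returns list of peek/dequeue results (-1 if empty).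
--
--     Two-stack queue: 'back' receives enqueues; 'front' holds the reversed
--     back, transferred lazily, so the queue head is front[-1] (O(1) pop)."""
--     front: list[int] = []
--     back: list[int] = []
--     results: list[int] = []
--     for j, op in enumerate(ops):
--         if op == 1:
--             if len(front) + len(back) < capacity:
--                 back.append(vals[j])
--         elif op == 2 or op == 3:
--             if not front:
--                 front = back[::-1]
--                 back = []
--             if front:
--                 results.append(front.pop() if op == 2 else front[-1])
--             else:
--                 results.append(-1)
--     return results
-- ===== Notes on version B (the rewrite author's own statement) =====
-- stated objective: alternative
-- what changed: B replaces A's preallocated fixed-size ring buffer with head/tail/size pointers and modular index arithmetic by a two-stack amortized queue (enqueues push on a back stack; dequeue/peek lazily move the reversed back stack onto a front stack and pop/read its top), dropping the zero-fill initialization loop; Pre_ excludes ops lists with an enqueue (op 1) at an index past the end of vals, where both programs raise IndexError unless the buffer happens to be full at that step.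
-- outside the precondition, e.g. on circular_buffer_ops(1, [1, 1], [5]): A returns [], B returns []
import Mathlib
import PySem

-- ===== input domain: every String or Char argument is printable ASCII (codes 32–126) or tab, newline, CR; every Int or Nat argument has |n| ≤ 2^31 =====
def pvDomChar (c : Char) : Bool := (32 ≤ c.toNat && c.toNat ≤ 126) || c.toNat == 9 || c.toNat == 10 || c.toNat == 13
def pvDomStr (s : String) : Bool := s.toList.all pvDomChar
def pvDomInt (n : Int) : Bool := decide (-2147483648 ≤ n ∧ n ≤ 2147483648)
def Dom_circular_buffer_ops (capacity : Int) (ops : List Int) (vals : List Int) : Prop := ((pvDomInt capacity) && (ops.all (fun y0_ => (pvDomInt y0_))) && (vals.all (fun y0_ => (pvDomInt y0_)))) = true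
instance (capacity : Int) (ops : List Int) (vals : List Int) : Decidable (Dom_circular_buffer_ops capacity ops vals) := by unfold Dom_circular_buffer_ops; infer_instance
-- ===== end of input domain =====

-- B replaces A's preallocated ring buffer (fixed array, head/tail/size, modular index arithmetic)
-- by a two-stack amortized queue: enqueues push on 'back'; dequeue/peek lazily transfer the
-- reversed 'back' into 'front' and read/pop front's top — a different data structure, same results.

-- ===== PORT A =====
-- One step of A's main while-loop; j is the loop index. ops[j] is always in range (0 ≤ j < len(ops),
-- so pyGetD with default 0 is exact). vals[j] is read via pyGetD with default 0: exact whenever the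
-- Python returns; where the Python raises IndexError (an op 1 whose index is past the end of vals,
-- with the buffer not full) the port reads the default instead; those inputs are outside Pre_.
-- buf[tail] / buf[head] are used only with
-- tail, head ∈ [0, capacity) = [0, len(buf)), so .toNat / pyGetD-with-default are exact there.
def pvStepA (capacity : Int) (ops vals : List Int) (st : List Int × Int × Int × Int × List Int)
    (j : Int) : List Int × Int × Int × Int × List Int :=
  match st with
  | (buf, head, tail, size, results) =>
    if PySem.List.pyGetD ops j 0 = 1 then
      if size < capacity then
        (buf.set tail.toNat (PySem.List.pyGetD vals j 0), head, PySem.Int.mod (tail + 1) capacity,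
          size + 1, results)
      else (buf, head, tail, size, results)
    else if PySem.List.pyGetD ops j 0 = 2 then
      if size > 0 then
        (buf, PySem.Int.mod (head + 1) capacity, tail, size - 1,
          results ++ [PySem.List.pyGetD buf head 0])
      else (buf, head, tail, size, results ++ [-1])
    else if PySem.List.pyGetD ops j 0 = 3 then
      if size > 0 then (buf, head, tail, size, results ++ [PySem.List.pyGetD buf head 0])
      else (buf, head, tail, size, results ++ [-1])
    else (buf, head, tail, size, results)

def circular_buffer_ops (capacity : Int) (ops : List Int) (vals : List Int) : List Int :=
  -- 'while i < capacity: buf.append(0)' is the inner foldl; 'while j < len(ops)' the outer one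
  ((PySem.List.pyRange 0 (PySem.List.len ops) 1).foldl (pvStepA capacity ops vals)
      ((PySem.List.pyRange 0 capacity 1).foldl (fun b _ => b ++ [(0 : Int)]) [], 0, 0, 0,
        [])).2.2.2.2

-- ===== PORT B =====
-- One step of B's for-loop over enumerate(ops): the state is (front, back, results).
-- front.pop() / front[-1] become getLast? / dropLast (the queue head is at front's END, as in
-- Source B); back[::-1] is back.reverse. vals[j] is read via pyGetD (j ≥ 0 from enumerate) with
-- default 1 — the default is arbitrary (any value works): under Pre_ the index is always in
-- range, and outside Pre_ the Python raises IndexError at that read, so nothing is claimed there.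
def pvStepB2 (capacity : Int) (vals : List Int) (st : List Int × List Int × List Int)
    (p : Int × Int) : List Int × List Int × List Int :=
  match st with
  | (front, back, results) =>
    if p.2 = 1 then
      if (front.length : Int) + (back.length : Int) < capacity then
        (front, back ++ [PySem.List.pyGetD vals p.1 1], results)
      else (front, back, results)
    else if p.2 = 2 ∨ p.2 = 3 then
      -- 'if not front: front = back[::-1]; back = []'
      let fb := if front = [] then (back.reverse, ([] : List Int)) else (front, back)
      match fb.1.getLast? with
      | none => (fb.1, fb.2, results ++ [-1])
      | some x => (if p.2 = 2 then fb.1.dropLast else fb.1, fb.2, results ++ [x])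
    else (front, back, results)

def circular_buffer_ops_alt (capacity : Int) (ops : List Int) (vals : List Int) : List Int :=
  ((PySem.List.enumerate ops 0).foldl (pvStepB2 capacity vals) ([], [], [])).2.2

-- ===== PRECONDITION & SPEC =====
-- Pre_ excludes inputs where some op 1 sits at an index past the end of vals: there the Python A
-- raises IndexError whenever the buffer is not full at that step (in the remaining full-buffer
-- case A returns and B returns the same value — see the cite in claim.json).
def Pre_circular_buffer_ops (capacity : Int) (ops : List Int) (vals : List Int) : Prop :=
  ∀ p ∈ PySem.List.enumerate ops 0, p.2 = 1 → p.1 < (vals.length : Int)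
instance (capacity : Int) (ops : List Int) (vals : List Int) : Decidable (Pre_circular_buffer_ops capacity ops vals) := by unfold Pre_circular_buffer_ops; infer_instance
def pvWitness_circular_buffer_ops : Int × List Int × List Int :=
  (2, [1, 1, 3, 2, 2], [10, 20, 0, 0, 0])

def Spec_circular_buffer_ops (capacity : Int) (ops : List Int) (vals : List Int) (out : List Int) : Prop := out = circular_buffer_ops_alt capacity ops vals
instance (capacity : Int) (ops : List Int) (vals : List Int) (out : List Int) : Decidable (Spec_circular_buffer_ops capacity ops vals out) := by unfold Spec_circular_buffer_ops; infer_instance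

-- ===== CLAIM (what is proved, stated in full; the proofs are below) =====
def Claim_equal_circular_buffer_ops : Prop := ∀ (capacity : Int) (ops : List Int) (vals : List Int), Dom_circular_buffer_ops capacity ops vals → Pre_circular_buffer_ops capacity ops vals → Spec_circular_buffer_ops capacity ops vals (circular_buffer_ops capacity ops vals)

-- ===== LEMMAS AND PROOFS =====

-- Proof-only reference model: the queue as one plain list (append / pop-front / front).
def pvStepQ (capacity : Int) (vals : List Int) (st : List Int × List Int) (p : Int × Int) :
    List Int × List Int :=
  if p.2 = 1 then
    if PySem.List.len st.1 < capacity then (st.1 ++ [PySem.List.pyGetD vals p.1 1], st.2) else st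
  else if p.2 = 2 then
    match st.1 with
    | [] => ([], st.2 ++ [-1])
    | x :: rest => (rest, st.2 ++ [x])
  else if p.2 = 3 then
    match st.1 with
    | [] => ([], st.2 ++ [-1])
    | x :: _ => (st.1, st.2 ++ [x])
  else st

-- Abstraction: the two stacks denote the queue front.reverse ++ back.
def pvAbs (st : List Int × List Int × List Int) : List Int × List Int :=
  (st.1.reverse ++ st.2.1, st.2.2)

lemma pvStepB2_abs (capacity : Int) (vals : List Int) (st : List Int × List Int × List Int)
    (p : Int × Int) :
    pvAbs (pvStepB2 capacity vals st p) = pvStepQ capacity vals (pvAbs st) p := by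
  obtain ⟨f, b, r⟩ := st
  by_cases h1 : p.2 = 1
  · simp only [pvStepB2, pvStepQ, pvAbs, PySem.List.len_eq, h1, if_true]
    by_cases hlt : (f.length : Int) + (b.length : Int) < capacity
    · rw [if_pos hlt, if_pos (by simp; omega)]
      simp
    · rw [if_neg hlt, if_neg (by simp; omega)]
  · by_cases h23 : p.2 = 2 ∨ p.2 = 3
    · -- dequeue / peek
      simp only [pvStepB2, h1, if_false, h23, if_true]
      by_cases hf : f = []
      · subst hf
        simp only [reduceIte]
        rcases hgl : (b.reverse).getLast? with _ | x
        · have hb : b = [] := by simpa using List.getLast?_eq_none_iff.mp hgl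
          subst hb
          rcases h23 with h2 | h3
          · simp [pvStepQ, pvAbs, h2]
          · simp [pvStepQ, pvAbs, h3]
        · obtain ⟨l', hl'⟩ := List.getLast?_eq_some_iff.mp hgl
          have hb : b = x :: l'.reverse := by
            rw [← List.reverse_reverse b, hl']; simp
          rcases h23 with h2 | h3
          · simp [pvStepQ, pvAbs, h2, hb]
          · have hne : p.2 ≠ 2 := by omega
            simp [pvStepQ, pvAbs, h3, hb]
      · simp only [if_neg hf]
        rcases hgl : f.getLast? with _ | x
        · exact absurd (List.getLast?_eq_none_iff.mp hgl) hf
        · obtain ⟨l', hl'⟩ := List.getLast?_eq_some_iff.mp hgl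
          rcases h23 with h2 | h3
          · simp [pvStepQ, pvAbs, h2, hl']
          · have hne : p.2 ≠ 2 := by omega
            simp [pvStepQ, pvAbs, h3, hl']
    · have h2 : p.2 ≠ 2 := fun h => h23 (Or.inl h)
      have h3 : p.2 ≠ 3 := fun h => h23 (Or.inr h)
      simp [pvStepB2, pvStepQ, pvAbs, h1, h2, h3]

lemma pvFoldB2_abs (capacity : Int) (vals : List Int) :
    ∀ (L : List (Int × Int)) (st : List Int × List Int × List Int),
      pvAbs (L.foldl (pvStepB2 capacity vals) st) = L.foldl (pvStepQ capacity vals) (pvAbs st)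
  | [], _ => rfl
  | p :: L, st => by
    simp only [List.foldl_cons]
    rw [pvFoldB2_abs capacity vals L, pvStepB2_abs]

-- Coupling invariant between A's state (buf, head, tail, size, results) and the reference
-- queue state (q, results'): q is exactly the live window of buf of length size starting at
-- head, read cyclically.
def pvInv (capacity : Int) (stA : List Int × Int × Int × Int × List Int)
    (stB : List Int × List Int) : Prop :=
  stB.2 = stA.2.2.2.2 ∧
  stA.1.length = capacity.toNat ∧
  0 ≤ stA.2.1 ∧
  stA.2.2.2.1 = (stB.1.length : Int) ∧
  (stA.2.2.2.1 ≤ capacity ∨ stA.2.2.2.1 = 0) ∧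
  (0 < capacity → stA.2.1 < capacity ∧ stA.2.2.1 = (stA.2.1 + stA.2.2.2.1) % capacity ∧
    ∀ k : Nat, k < stB.1.length →
      PySem.List.pyGetD stA.1 ((stA.2.1 + (k : Int)) % capacity) 0 = stB.1.getD k 0)

lemma pvStep_inv (capacity : Int) (ops vals : List Int) (j : Int)
    (hj : PySem.List.pyGetD ops j 0 = 1 →
      PySem.List.pyGetD vals j 0 = PySem.List.pyGetD vals j 1)
    (stA : List Int × Int × Int × Int × List Int) (stB : List Int × List Int)
    (h : pvInv capacity stA stB) :
    pvInv capacity (pvStepA capacity ops vals stA j)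
      (pvStepQ capacity vals stB (j, PySem.List.pyGetD ops j 0)) := by
  obtain ⟨buf, head, tail, size, res⟩ := stA
  obtain ⟨q, res'⟩ := stB
  obtain ⟨h1, h2, h3, h4, h5, h6⟩ := h
  simp only [pvInv] at h1 h2 h3 h4 h5 h6 ⊢
  simp only [pvStepA, pvStepQ, PySem.List.len_eq]
  by_cases hop1 : PySem.List.pyGetD ops j 0 = 1
  · simp only [hop1, if_true]
    by_cases hlt : size < capacity
    · have hlt' : (q.length : Int) < capacity := by omega
      rw [if_pos hlt, if_pos hlt']
      dsimp only
      rw [← hj hop1]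
      have hc : 0 < capacity := by omega
      obtain ⟨hh, ht, helem⟩ := h6 hc
      have htl1 : 0 ≤ tail := ht ▸ Int.emod_nonneg _ (by omega)
      have htl2 : tail < capacity := ht ▸ Int.emod_lt_of_pos _ hc
      have htn : tail.toNat < buf.length := by omega
      refine ⟨h1, by simp [h2], h3, by simp; omega, by left; omega, fun _ => ⟨hh, ?_, ?_⟩⟩
      · rw [PySem.Int.mod_eq_emod_of_pos hc, ht, Int.emod_add_emod]
        ring_nf
      · intro k hk
        simp only [List.length_append, List.length_cons, List.length_nil] at hk
        have hb1 : 0 ≤ (head + (k : Int)) % capacity := Int.emod_nonneg _ (by omega)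
        have hb2 : (head + (k : Int)) % capacity < capacity := Int.emod_lt_of_pos _ hc
        rw [PySem.List.pyGetD_of_nonneg _ _ hb1]
        rcases Nat.lt_or_ge k q.length with hk' | hk'
        · have hne : tail.toNat ≠ ((head + (k : Int)) % capacity).toNat := by
            intro he
            have heq : (head + (k : Int)) % capacity = (head + size) % capacity := by
              rw [← ht]; omega
            have hd := Int.dvd_of_emod_eq_zero (Int.emod_eq_emod_iff_emod_sub_eq_zero.mp heq)
            have hd2 : capacity ∣ (size - (k : Int)) := by
              rw [show size - (k : Int) = -((head + (k : Int)) - (head + size)) by ring]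
              exact dvd_neg.mpr hd
            have := Int.le_of_dvd (by omega) hd2
            omega
          have hset : (buf.set tail.toNat (PySem.List.pyGetD vals j 0)).getD
              ((head + (k : Int)) % capacity).toNat 0 =
              buf.getD ((head + (k : Int)) % capacity).toNat 0 := by
            simp [List.getD_eq_getElem?_getD, List.getElem?_set_ne hne]
          rw [hset, ← PySem.List.pyGetD_of_nonneg _ _ hb1, helem k hk']
          simp [List.getD_eq_getElem?_getD, List.getElem?_append_left hk']
        · have hkq : k = q.length := by omega
          have hidx : head + (k : Int) = head + size := by omega
          rw [hidx, ← ht]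
          simp [List.getD_eq_getElem?_getD, htn, hkq]
    · have hlt' : ¬ (q.length : Int) < capacity := by omega
      rw [if_neg hlt, if_neg hlt']
      exact ⟨h1, h2, h3, h4, h5, h6⟩
  · rw [if_neg hop1, if_neg hop1]
    by_cases hop2 : PySem.List.pyGetD ops j 0 = 2
    · simp only [hop2, if_true]
      by_cases hpos : size > 0
      · rw [if_pos hpos]
        have h5' : size ≤ capacity := by rcases h5 with h5 | h5 <;> omega
        have hc : 0 < capacity := by omega
        obtain ⟨hh, ht, helem⟩ := h6 hc
        rcases q with _ | ⟨x, rest⟩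
        · simp at h4; omega
        · dsimp only
          rw [show PySem.Int.mod (head + 1) capacity = (head + 1) % capacity from
            PySem.Int.mod_eq_emod_of_pos hc]
          have hx : PySem.List.pyGetD buf head 0 = x := by
            have h0 := helem 0 (by simp)
            simpa [Int.emod_eq_of_lt h3 hh] using h0
          refine ⟨by simp [h1, hx], h2, Int.emod_nonneg _ (by omega),
            by simp at h4 ⊢; omega, by left; omega,
            fun _ => ⟨Int.emod_lt_of_pos _ hc, ?_, ?_⟩⟩
          · rw [Int.emod_add_emod, show head + 1 + (size - 1) = head + size by ring]
            exact ht
          · intro k hk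
            rw [Int.emod_add_emod, show head + 1 + (k : Int) = head + ((k : Int) + 1) by ring]
            have := helem (k + 1) (by simp; omega)
            push_cast at this
            simpa using this
      · rw [if_neg hpos]
        have hq : q = [] := List.eq_nil_of_length_eq_zero (by omega)
        subst hq
        exact ⟨by simp [h1], h2, h3, h4, h5, fun hc => ⟨(h6 hc).1, (h6 hc).2.1, by simp⟩⟩
    · rw [if_neg hop2, if_neg hop2]
      by_cases hop3 : PySem.List.pyGetD ops j 0 = 3
      · simp only [hop3, if_true]
        by_cases hpos : size > 0
        · rw [if_pos hpos]
          have h5' : size ≤ capacity := by rcases h5 with h5 | h5 <;> omega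
          have hc : 0 < capacity := by omega
          obtain ⟨hh, ht, helem⟩ := h6 hc
          rcases q with _ | ⟨x, rest⟩
          · simp at h4; omega
          · have hx : PySem.List.pyGetD buf head 0 = x := by
              have h0 := helem 0 (by simp)
              simpa [Int.emod_eq_of_lt h3 hh] using h0
            exact ⟨by simp [h1, hx], h2, h3, h4, h5, h6⟩
        · rw [if_neg hpos]
          have hq : q = [] := List.eq_nil_of_length_eq_zero (by omega)
          subst hq
          exact ⟨by simp [h1], h2, h3, h4, h5, h6⟩
      · rw [if_neg hop3, if_neg hop3]
        exact ⟨h1, h2, h3, h4, h5, h6⟩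

lemma pvFold_inv (capacity : Int) (ops vals : List Int) :
    ∀ (L : List Int),
      (∀ j ∈ L, PySem.List.pyGetD ops j 0 = 1 →
        PySem.List.pyGetD vals j 0 = PySem.List.pyGetD vals j 1) →
      ∀ (stA : List Int × Int × Int × Int × List Int) (stB : List Int × List Int),
      pvInv capacity stA stB →
      pvInv capacity (L.foldl (pvStepA capacity ops vals) stA)
        (L.foldl (fun st j => pvStepQ capacity vals st (j, PySem.List.pyGetD ops j 0)) stB)
  | [], _, _, _, h => h
  | j :: L, hL, stA, stB, h => by
    simpa using pvFold_inv capacity ops vals L (fun i hi => hL i (List.mem_cons_of_mem _ hi)) _ _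
      (pvStep_inv capacity ops vals j (hL j (List.mem_cons_self)) stA stB h)

-- ===== VERDICT (by name: the statement is the Claim_ definition above) =====
theorem circular_buffer_ops_spec : Claim_equal_circular_buffer_ops := by
  intro capacity ops vals _ hpre
  unfold Spec_circular_buffer_ops circular_buffer_ops circular_buffer_ops_alt
  have habs := pvFoldB2_abs capacity vals (PySem.List.enumerate ops 0) ([], [], [])
  have hout : ((PySem.List.enumerate ops 0).foldl (pvStepB2 capacity vals) ([], [], [])).2.2 =
      ((PySem.List.enumerate ops 0).foldl (pvStepQ capacity vals) ([], [])).2 := by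
    have := congrArg Prod.snd habs
    simpa [pvAbs] using this
  rw [hout, PySem.List.enumerate_eq_map_pyRange ops 0, List.foldl_map]
  have hinit : pvInv capacity
      ((PySem.List.pyRange 0 capacity 1).foldl (fun b _ => b ++ [(0 : Int)]) [], 0, 0, 0, [])
      ([], []) := by
    refine ⟨rfl, ?_, le_refl 0, rfl, Or.inr rfl, fun hc => ⟨hc, by simp, by simp⟩⟩
    simp [PySem.List.length_pyRange_one]
  have hL : ∀ j ∈ PySem.List.pyRange 0 (PySem.List.len ops) 1,
      PySem.List.pyGetD ops j 0 = 1 →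
      PySem.List.pyGetD vals j 0 = PySem.List.pyGetD vals j 1 := by
    intro j hjmem hop1
    obtain ⟨hj0, -⟩ := (PySem.List.mem_pyRange_one).mp hjmem
    have hjv : j < (vals.length : Int) := by
      have hmem : (j, PySem.List.pyGetD ops j 0) ∈ PySem.List.enumerate ops 0 := by
        rw [PySem.List.enumerate_eq_map_pyRange ops 0]
        exact List.mem_map_of_mem hjmem
      exact hpre _ hmem hop1
    have hjn : j.toNat < vals.length := by omega
    rw [PySem.List.pyGetD_of_nonneg _ _ hj0, PySem.List.pyGetD_of_nonneg _ _ hj0]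
    simp [List.getD_eq_getElem?_getD, List.getElem?_eq_getElem hjn]
  have h := pvFold_inv capacity ops vals (PySem.List.pyRange 0 (PySem.List.len ops) 1) hL _ _ hinit
  exact h.1.symm
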